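-- pv_equiv track=rewrite | github.com/irron2004/calculate_math | 01_백엔드/backend/app/graph_patch.py | _ordered_patches
-- ===== SOURCE A (Python) =====
-- from typing import Any, Iterable, Mapping
--
-- _RESEARCHER_ORDER = {"R1": 0, "R2": 1, "R3": 2}
--
-- def _ordered_patches(patches: Iterable[Mapping[str, Any]]) -> list[Mapping[str, Any]]:
--     ordered = []
--     for idx, patch in enumerate(patches):
--         researcher = patch.get("researcher")
--         priority = _RESEARCHER_ORDER.get(researcher, 99)
--         ordered.append((priority, idx, patch))
--     ordered.sort(key=lambda item: (item[0], item[1]))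
--     return [patch for _, __, patch in ordered]
-- ===== SOURCE B (Python) =====
-- from typing import Any, Iterable, Mapping
--
-- _RESEARCHER_ORDER = {"R1": 0, "R2": 1, "R3": 2}
--
-- def _ordered_patches(patches: Iterable[Mapping[str, Any]]) -> list[Mapping[str, Any]]:
--     # Bucket partition over the fixed priority classes; no sort needed.
--     b1, b2, b3, rest = [], [], [], []
--     for patch in patches:
--         researcher = patch.get("researcher")
--         if researcher == "R1":
--             b1.append(patch)
--         elif researcher == "R2":
--             b2.append(patch)
--         elif researcher == "R3":
--             b3.append(patch)
--         else:
--             rest.append(patch)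
--     return b1 + b2 + b3 + rest
-- ===== Notes on version B (the rewrite author's own statement) =====
-- stated objective: alternative
-- what changed: Replaces decorate-with-(priority,index), comparison sort, undecorate by a single-pass bucket partition over the four fixed priority classes (R1/R2/R3/other), concatenating the buckets; stability is inherent in append order.
import Mathlib
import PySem

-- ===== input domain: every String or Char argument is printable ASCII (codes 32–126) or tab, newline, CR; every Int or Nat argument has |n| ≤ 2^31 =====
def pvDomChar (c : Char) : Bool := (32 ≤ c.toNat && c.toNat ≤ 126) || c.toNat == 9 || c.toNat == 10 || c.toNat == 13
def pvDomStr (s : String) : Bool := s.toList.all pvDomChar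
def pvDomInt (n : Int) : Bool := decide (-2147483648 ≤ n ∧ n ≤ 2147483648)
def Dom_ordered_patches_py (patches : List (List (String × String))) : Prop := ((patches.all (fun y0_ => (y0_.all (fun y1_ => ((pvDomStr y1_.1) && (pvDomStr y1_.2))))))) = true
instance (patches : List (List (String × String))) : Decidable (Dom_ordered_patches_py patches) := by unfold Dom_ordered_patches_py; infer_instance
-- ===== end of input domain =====

-- B replaces A's decorate-with-(priority,index) / comparison-sort / undecorate by a
-- single-pass bucket partition over the four fixed priority classes.

-- ===== PORT A =====
-- _RESEARCHER_ORDER = {"R1": 0, "R2": 1, "R3": 2}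
def pvResearcherOrder : PySem.Dict String Int :=
  PySem.Dict.ofList [("R1", 0), ("R2", 1), ("R3", 2)]

-- researcher = patch.get("researcher"); priority = _RESEARCHER_ORDER.get(researcher, 99)
-- (a dict is an association list; .get is the first-match lookup)
def pvPriority (patch : List (String × String)) : Int :=
  match List.lookup "researcher" patch with
  | some r => pvResearcherOrder.getD r 99
  | none => 99

def ordered_patches_py (patches : List (List (String × String))) : List (List (String × String)) :=
  let ordered := (PySem.List.enumerate patches 0).foldl
    (fun acc ip => acc ++ [(pvPriority ip.2, ip.1, ip.2)]) []
  let sorted := PySem.List.sorted2 ordered (fun item => item.1) (fun item => item.2.1) false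
  sorted.map (fun t => t.2.2)

-- ===== PORT B =====
-- the loop body: r = patch.get("researcher"); if r == "R1": b1.append(patch) elif …
def pvBStep (b : List (List (String × String)) × List (List (String × String)) × List (List (String × String)) × List (List (String × String)))
    (patch : List (String × String)) :
    List (List (String × String)) × List (List (String × String)) × List (List (String × String)) × List (List (String × String)) :=
  let r := List.lookup "researcher" patch
  if r == some "R1" then (b.1 ++ [patch], b.2.1, b.2.2.1, b.2.2.2)
  else if r == some "R2" then (b.1, b.2.1 ++ [patch], b.2.2.1, b.2.2.2)
  else if r == some "R3" then (b.1, b.2.1, b.2.2.1 ++ [patch], b.2.2.2)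
  else (b.1, b.2.1, b.2.2.1, b.2.2.2 ++ [patch])

def ordered_patches_py_alt (patches : List (List (String × String))) : List (List (String × String)) :=
  let b := patches.foldl pvBStep ([], [], [], [])
  b.1 ++ b.2.1 ++ b.2.2.1 ++ b.2.2.2

-- ===== PRECONDITION & SPEC =====
def Spec_ordered_patches_py (patches : List (List (String × String))) (out : List (List (String × String))) : Prop := out = ordered_patches_py_alt patches
instance (patches : List (List (String × String))) (out : List (List (String × String))) : Decidable (Spec_ordered_patches_py patches out) := by unfold Spec_ordered_patches_py; infer_instance

-- ===== CLAIM (what is proved, stated in full; the proofs are below) =====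
def Claim_equal_ordered_patches_py : Prop := ∀ (patches : List (List (String × String))), Dom_ordered_patches_py patches → Spec_ordered_patches_py patches (ordered_patches_py patches)

-- ===== LEMMAS AND PROOFS =====

theorem pvOrder_mk : pvResearcherOrder = PySem.Dict.mk [("R1", 0), ("R2", 1), ("R3", 2)] := by rfl

theorem pvEmpty_mk : (PySem.Dict.mk ([] : List (String × Int))) = PySem.Dict.empty := rfl

-- _RESEARCHER_ORDER.get(r, 99) as an if-chain
theorem pvPriority_some (r : String) :
    pvResearcherOrder.getD r 99 =
      if r = "R1" then 0 else if r = "R2" then 1 else if r = "R3" then 2 else 99 := by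
  rw [pvOrder_mk]
  simp only [PySem.Dict.getD, PySem.Dict.get?_mk_cons, pvEmpty_mk, PySem.Dict.get?_empty,
    beq_iff_eq]
  split_ifs <;> subst_vars <;> simp_all

-- pvPriority as an if-chain on the looked-up researcher
theorem pvPriority_eq (p : List (String × String)) :
    pvPriority p =
      if List.lookup "researcher" p = some "R1" then 0
      else if List.lookup "researcher" p = some "R2" then 1
      else if List.lookup "researcher" p = some "R3" then 2
      else 99 := by
  unfold pvPriority
  cases h : List.lookup "researcher" p with
  | none => simp
  | some r =>
    show pvResearcherOrder.getD r 99 = _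
    rw [pvPriority_some]; split_ifs <;> simp_all

theorem pvPriority_cases (p : List (String × String)) :
    pvPriority p = 0 ∨ pvPriority p = 1 ∨ pvPriority p = 2 ∨ pvPriority p = 99 := by
  rw [pvPriority_eq]; split_ifs <;> simp

-- B's fold appends each patch to the bucket of its priority class.
theorem pvB_fold (patches : List (List (String × String)))
    (b0 b1 b2 b3 : List (List (String × String))) :
    patches.foldl pvBStep (b0, b1, b2, b3) =
      (b0 ++ patches.filter (fun p => pvPriority p == 0),
       b1 ++ patches.filter (fun p => pvPriority p == 1),
       b2 ++ patches.filter (fun p => pvPriority p == 2),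
       b3 ++ patches.filter (fun p => pvPriority p == 99)) := by
  induction patches generalizing b0 b1 b2 b3 with
  | nil => simp
  | cons p ps ih =>
    by_cases h1 : List.lookup "researcher" p = some "R1"
    · have hs : pvBStep (b0, b1, b2, b3) p = (b0 ++ [p], b1, b2, b3) := by simp [pvBStep, h1]
      have hp : pvPriority p = 0 := by rw [pvPriority_eq, if_pos h1]
      rw [List.foldl_cons, hs, ih]
      simp [hp]
    · by_cases h2 : List.lookup "researcher" p = some "R2"
      · have hs : pvBStep (b0, b1, b2, b3) p = (b0, b1 ++ [p], b2, b3) := by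
          simp [pvBStep, h2]
        have hp : pvPriority p = 1 := by rw [pvPriority_eq, if_neg h1, if_pos h2]
        rw [List.foldl_cons, hs, ih]
        simp [hp]
      · by_cases h3 : List.lookup "researcher" p = some "R3"
        · have hs : pvBStep (b0, b1, b2, b3) p = (b0, b1, b2 ++ [p], b3) := by
            simp [pvBStep, h3]
          have hp : pvPriority p = 2 := by rw [pvPriority_eq, if_neg h1, if_neg h2, if_pos h3]
          rw [List.foldl_cons, hs, ih]
          simp [hp]
        · have hs : pvBStep (b0, b1, b2, b3) p = (b0, b1, b2, b3 ++ [p]) := by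
            simp [pvBStep, h1, h2, h3]
          have hp : pvPriority p = 99 := by
            rw [pvPriority_eq, if_neg h1, if_neg h2, if_neg h3]
          rw [List.foldl_cons, hs, ih]
          simp [hp]

-- A's decorate loop as a map over the enumeration.
theorem pvA_decorate (patches : List (List (String × String))) :
    (PySem.List.enumerate patches 0).foldl
      (fun acc ip => acc ++ [(pvPriority ip.2, ip.1, ip.2)]) [] =
    (PySem.List.enumerate patches 0).map (fun ip => (pvPriority ip.2, ip.1, ip.2)) := by
  rw [PySem.List.foldl_append_singleton_eq_map]; simp

-- sorted2 with two Int keys is sorted with the lexicographic key.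
theorem pv_sorted2_eq_sorted_lex {α : Type} (xs : List α) (k1 k2 : α → Int) :
    PySem.List.sorted2 xs k1 k2 false =
      PySem.List.sorted xs (fun a => toLex (k1 a, k2 a)) false := by
  have hb : (fun a b => decide (k1 a < k1 b) || (!decide (k1 b < k1 a) && decide (k2 a < k2 b)))
      = (fun a b : α => decide (toLex (k1 a, k2 a) < toLex (k1 b, k2 b))) := by
    funext a b
    rw [Bool.eq_iff_iff]
    simp only [Bool.or_eq_true, Bool.and_eq_true, decide_eq_true_iff, Bool.not_eq_true',
      decide_eq_false_iff_not, Prod.Lex.toLex_lt_toLex]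
    omega
  rw [PySem.List.sorted_eq_foldl_insertBy]
  simp only [PySem.List.sorted2, hb]
  simp

theorem pv_filter_comp (X : List (Int × Int × List (String × String))) (c c' : Int)
    (hne : c' ≠ c) :
    (X.filter (fun t => !(t.1 == c))).filter (fun t => t.1 == c') =
      X.filter (fun t => t.1 == c') := by
  rw [List.filter_filter]
  apply List.filter_congr
  intro t _
  by_cases h : t.1 = c' <;> simp [h, hne]

theorem ordered_patches_main (patches : List (List (String × String))) :
    ordered_patches_py patches = ordered_patches_py_alt patches := by
  have hA : ordered_patches_py patches
      = (PySem.List.sorted2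
          ((PySem.List.enumerate patches 0).foldl
            (fun acc ip => acc ++ [(pvPriority ip.2, ip.1, ip.2)]) [])
          (fun item => item.1) (fun item => item.2.1) false).map (fun t => t.2.2) := rfl
  rw [hA, pvA_decorate, pv_sorted2_eq_sorted_lex]
  -- the decorated list
  set g : Int × List (String × String) → Int × Int × List (String × String) :=
    fun ip => (pvPriority ip.2, ip.1, ip.2) with hg
  set X : List (Int × Int × List (String × String)) :=
    (PySem.List.enumerate patches 0).map g with hX
  -- every decorated triple carries its patch's priority in slot 1
  have hmemX : ∀ t ∈ X, t.1 = pvPriority t.2.2 := by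
    intro t ht
    obtain ⟨ip, _, rfl⟩ := List.mem_map.mp ht
    rfl
  -- the index components of X are strictly increasing
  have hidx : X.Pairwise (fun a b => a.2.1 < b.2.1) := by
    have h1 := PySem.List.pairwise_lt_pyRange_one 0 (0 + (patches.length : Int))
    rw [← PySem.List.map_fst_enumerate patches 0, List.pairwise_map] at h1
    rw [hX, List.pairwise_map]
    exact h1
  -- the four buckets of X
  set f : Int → List (Int × Int × List (String × String)) :=
    fun c => X.filter (fun t => t.1 == c) with hf
  set ys := f 0 ++ (f 1 ++ (f 2 ++ f 99)) with hys
  -- ys is a permutation of X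
  have hperm : ys.Perm X := by
    have h0 := List.filter_append_perm (fun t => t.1 == (0:Int)) X
    have h1 := List.filter_append_perm (fun t => t.1 == (1:Int))
      (X.filter (fun t => !(t.1 == 0)))
    have h2 := List.filter_append_perm (fun t => t.1 == (2:Int))
      ((X.filter (fun t => !(t.1 == 0))).filter (fun t => !(t.1 == 1)))
    rw [pv_filter_comp X 0 1 (by decide)] at h1
    rw [pv_filter_comp (X.filter (fun t => !(t.1 == 0))) 1 2 (by decide),
      pv_filter_comp X 0 2 (by decide)] at h2
    have h99 : ((X.filter (fun t => !(t.1 == 0))).filter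
        (fun t => !(t.1 == 1))).filter (fun t => !(t.1 == 2))
        = X.filter (fun t => t.1 == 99) := by
      rw [List.filter_filter, List.filter_filter]
      apply List.filter_congr
      intro t ht
      have ht1 := hmemX t ht
      rcases pvPriority_cases t.2.2 with h | h | h | h <;> rw [ht1, h] <;> decide
    rw [h99] at h2
    exact (List.Perm.append_left (f 0)
      ((List.Perm.append_left (f 1) h2).trans h1)).trans h0
  -- ys is strictly increasing under the lexicographic key
  have hpw : ys.Pairwise (fun a b => (fun t : Int × Int × List (String × String) =>
      toLex (t.1, t.2.1)) a < (fun t : Int × Int × List (String × String) =>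
      toLex (t.1, t.2.1)) b) := by
    have hbucket : ∀ c : Int, (f c).Pairwise (fun a b => toLex (a.1, a.2.1) < toLex (b.1, b.2.1)) := by
      intro c
      have hsub : List.Sublist (f c) X := List.filter_sublist
      have hp : (f c).Pairwise (fun a b => a.2.1 < b.2.1) := hidx.sublist hsub
      refine hp.imp_of_mem ?_
      intro a b ha hb hab
      have ha1 : a.1 = c := by simpa using (List.mem_filter.mp ha).2
      have hb1 : b.1 = c := by simpa using (List.mem_filter.mp hb).2
      rw [Prod.Lex.toLex_lt_toLex]
      exact Or.inr ⟨by rw [ha1, hb1], hab⟩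
    have hcross : ∀ (c c' : Int), c < c' → ∀ a ∈ f c, ∀ b ∈ f c',
        toLex (a.1, a.2.1) < toLex (b.1, b.2.1) := by
      intro c c' hlt a ha b hb
      have ha1 : a.1 = c := by simpa using (List.mem_filter.mp ha).2
      have hb1 : b.1 = c' := by simpa using (List.mem_filter.mp hb).2
      rw [Prod.Lex.toLex_lt_toLex]
      exact Or.inl (by rw [ha1, hb1]; exact hlt)
    rw [hys]
    simp only [List.pairwise_append]
    refine ⟨hbucket 0, ⟨hbucket 1, ⟨hbucket 2, hbucket 99, ?_⟩, ?_⟩, ?_⟩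
    · exact hcross 2 99 (by decide)
    · intro a ha b hb
      rcases List.mem_append.mp hb with hb | hb
      · exact hcross 1 2 (by decide) a ha b hb
      · exact hcross 1 99 (by decide) a ha b hb
    · intro a ha b hb
      rcases List.mem_append.mp hb with hb | hb
      · exact hcross 0 1 (by decide) a ha b hb
      rcases List.mem_append.mp hb with hb | hb
      · exact hcross 0 2 (by decide) a ha b hb
      · exact hcross 0 99 (by decide) a ha b hb
  rw [PySem.List.sorted_eq_of_perm_of_pairwise_lt X ys
    (fun t => toLex (t.1, t.2.1)) hperm hpw]
  -- mapping the patch back out of each bucket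
  have hmapc : ∀ c : Int, (f c).map (fun t => t.2.2)
      = patches.filter (fun p => pvPriority p == c) := by
    intro c
    show (List.filter (fun t => t.1 == c) X).map (fun t => t.2.2) = _
    rw [hX, List.filter_map, List.map_map]
    conv_rhs => rw [← PySem.List.map_snd_enumerate patches 0, List.filter_map]
    rfl
  -- B's buckets
  have hB : ordered_patches_py_alt patches
      = patches.filter (fun p => pvPriority p == 0)
        ++ (patches.filter (fun p => pvPriority p == 1)
        ++ (patches.filter (fun p => pvPriority p == 2)
        ++ patches.filter (fun p => pvPriority p == 99))) := by
    show (patches.foldl pvBStep ([], [], [], [])).1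
        ++ (patches.foldl pvBStep ([], [], [], [])).2.1
        ++ (patches.foldl pvBStep ([], [], [], [])).2.2.1
        ++ (patches.foldl pvBStep ([], [], [], [])).2.2.2 = _
    rw [pvB_fold]
    simp [List.append_assoc]
  rw [hB, hys]
  simp only [List.map_append]
  rw [hmapc 0, hmapc 1, hmapc 2, hmapc 99]

-- ===== VERDICT (by name: the statement is the Claim_ definition above) =====
theorem ordered_patches_py_spec : Claim_equal_ordered_patches_py := by
  intro patches _
  exact ordered_patches_main patches
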